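-- pv_equiv track=rewrite | github.com/cloudwarriors-ai/dialpad-api-gateway | app/services/transformation_functions.py | normalize_address
-- ===== SOURCE A (Python) =====
-- from typing import Any, Dict, List, Optional
--
-- def normalize_address(value: Dict[str, Any], params: Optional[Dict[str, Any]] = None) -> Dict[str, Any]:
--     """
--     Normalize address fields to a standard format
--
--     Args:
--         value: Address to normalize
--         params: Optional parameters
--
--     Returns:
--         Normalized address
--     """
--     if not value or not isinstance(value, dict):
--         return value
--
--     # Create a standardized address format
--     normalized = {}
--
--     # Map common field variations to standard names
--     field_mapping = {
--         'street': ['street', 'street_address', 'address_line_1', 'line1'],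
--         'street2': ['street2', 'address_line_2', 'line2'],
--         'city': ['city', 'locality'],
--         'state': ['state', 'region', 'province'],
--         'postal_code': ['postal_code', 'zip', 'zip_code', 'postcode'],
--         'country': ['country', 'country_code']
--     }
--
--     # Normalize fields based on mapping
--     for standard_field, field_variations in field_mapping.items():
--         for field in field_variations:
--             if field in value:
--                 normalized[standard_field] = value[field]
--                 break
--
--     # Copy any additional fields not in our mapping
--     for field, field_value in value.items():
--         if not any(field in variations for variations in field_mapping.values()):
--             normalized[field] = field_value
--
--     return normalized
-- ===== SOURCE B (Python) =====
-- def normalize_address(value, params=None):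
--     """Normalize address fields to standard keys via an inverted variation->(field, rank) index, in one pass over the input."""
--     if not value or not isinstance(value, dict):
--         return value
--
--     field_mapping = {
--         'street': ['street', 'street_address', 'address_line_1', 'line1'],
--         'street2': ['street2', 'address_line_2', 'line2'],
--         'city': ['city', 'locality'],
--         'state': ['state', 'region', 'province'],
--         'postal_code': ['postal_code', 'zip', 'zip_code', 'postcode'],
--         'country': ['country', 'country_code']
--     }
--
--     # Inverted index: variation -> (standard field, priority rank).
--     lookup = {}
--     for standard_field, variations in field_mapping.items():
--         for rank, variation in enumerate(variations):
--             lookup[variation] = (standard_field, rank)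
--
--     best = {}    # standard field -> (rank, value), keeping the lowest rank seen
--     extras = {}  # unknown fields, copied through
--     for field, field_value in value.items():
--         hit = lookup.get(field)
--         if hit is not None:
--             standard_field, rank = hit
--             if standard_field not in best or rank < best[standard_field][0]:
--                 best[standard_field] = (rank, field_value)
--         else:
--             extras[field] = field_value
--
--     result = {sf: best[sf][1] for sf in field_mapping if sf in best}
--     result.update(extras)
--     return result
-- ===== Notes on version B (the rewrite author's own statement) =====
-- stated objective: faster
-- what changed: A scans the field mapping and probes the input dict once per variation (break on first hit) and then re-scans all 18 variation lists for every input field; B builds an inverted index variation -> (standard field, rank) once and makes a single pass over the input's items, keeping the lowest-rank match per standard field and collecting unknown fields as extras, then assembles the result.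
import Mathlib
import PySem

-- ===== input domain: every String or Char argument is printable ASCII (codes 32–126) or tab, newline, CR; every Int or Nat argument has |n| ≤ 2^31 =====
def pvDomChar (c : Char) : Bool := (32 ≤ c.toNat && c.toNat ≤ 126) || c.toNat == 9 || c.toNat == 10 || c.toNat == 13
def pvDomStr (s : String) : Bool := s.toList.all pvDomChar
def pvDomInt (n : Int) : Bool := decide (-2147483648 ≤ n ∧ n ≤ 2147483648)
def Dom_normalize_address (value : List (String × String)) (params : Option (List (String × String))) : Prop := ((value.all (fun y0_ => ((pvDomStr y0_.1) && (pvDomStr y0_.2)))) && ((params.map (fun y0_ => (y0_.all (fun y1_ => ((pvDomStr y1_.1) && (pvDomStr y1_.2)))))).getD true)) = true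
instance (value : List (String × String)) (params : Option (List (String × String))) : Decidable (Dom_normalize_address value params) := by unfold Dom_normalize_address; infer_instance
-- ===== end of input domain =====

-- B replaces A's mapping-order scan (for each standard field, scan its variations and probe the dict)
-- by an inverted index variation -> (standard field, rank) and ONE pass over the input's items,
-- keeping the lowest-rank match per standard field; objective: faster by a constant factor (one pass, measured).
-- Input/output dicts are association lists in insertion order, lookup = first match.

-- ===== PORT A =====
-- first-match lookup on the association list: 'f in value' = (pvLook value f).isSome, 'value[f]' = its value
def pvLook (value : List (String × String)) (f : String) : Option String :=
  (value.find? (fun kv => kv.1 == f)).map (fun kv => kv.2)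

def pvFieldMapping : List (String × List String) :=
  [("street", ["street", "street_address", "address_line_1", "line1"]),
   ("street2", ["street2", "address_line_2", "line2"]),
   ("city", ["city", "locality"]),
   ("state", ["state", "region", "province"]),
   ("postal_code", ["postal_code", "zip", "zip_code", "postcode"]),
   ("country", ["country", "country_code"])]

def normalize_address (value : List (String × String)) (params : Option (List (String × String))) : List (String × String) :=
  if value = [] then value
  else
    -- for standard_field, field_variations: for field: if field in value: normalized[std] = value[field]; break
    let normalized : PySem.Dict String String :=
      pvFieldMapping.foldl (fun d p =>
        match p.2.find? (fun f => (pvLook value f).isSome) with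
        | some f => d.insert p.1 ((pvLook value f).getD "")  -- getD default never used: f was found in value
        | none => d) PySem.Dict.empty
    -- copy any additional fields not in our mapping
    let normalized2 : PySem.Dict String String :=
      value.foldl (fun d fv =>
        if pvFieldMapping.any (fun p => p.2.any (fun f => f == fv.1)) then d
        else d.insert fv.1 fv.2) normalized
    normalized2.items

-- ===== PORT B =====
def pvFieldMappingB : List (String × List String) :=
  [("street", ["street", "street_address", "address_line_1", "line1"]),
   ("street2", ["street2", "address_line_2", "line2"]),
   ("city", ["city", "locality"]),
   ("state", ["state", "region", "province"]),
   ("postal_code", ["postal_code", "zip", "zip_code", "postcode"]),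
   ("country", ["country", "country_code"])]

-- inverted index: variation -> (standard field, priority rank)
def pvLookupTableB : PySem.Dict String (String × Int) :=
  pvFieldMappingB.foldl (fun d p =>
    (PySem.List.enumerate p.2).foldl (fun d q => d.insert q.2 (p.1, q.1)) d) PySem.Dict.empty

def normalize_address_alt (value : List (String × String)) (params : Option (List (String × String))) : List (String × String) :=
  if value = [] then value
  else
    -- one pass: best : standard field -> (rank, value) keeping the lowest rank; extras : unknown fields
    let be := value.foldl (fun (be : PySem.Dict String (Int × String) × PySem.Dict String String) fv =>
      match pvLookupTableB.get? fv.1 with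
      | some sr =>
        (match be.1.get? sr.1 with
         | none => be.1.insert sr.1 (sr.2, fv.2)
         | some p => if sr.2 < p.1 then be.1.insert sr.1 (sr.2, fv.2) else be.1, be.2)
      | none => (be.1, be.2.insert fv.1 fv.2)) (PySem.Dict.empty, PySem.Dict.empty)
    -- result = {sf: best[sf][1] for sf in field_mapping if sf in best}; result.update(extras).
    -- The comprehension's keys are the six pairwise-distinct standard names, and extras' keys are
    -- never standard names (they missed the lookup table), so the dict's items are this concatenation.
    (pvFieldMappingB.filterMap (fun p => (be.1.get? p.1).map (fun q => (p.1, q.2)))) ++ be.2.items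

-- ===== PRECONDITION & SPEC =====
def Spec_normalize_address (value : List (String × String)) (params : Option (List (String × String))) (out : List (String × String)) : Prop := out = normalize_address_alt value params
instance (value : List (String × String)) (params : Option (List (String × String))) (out : List (String × String)) : Decidable (Spec_normalize_address value params out) := by unfold Spec_normalize_address; infer_instance

-- ===== CLAIM (what is proved, stated in full; the proofs are below) =====
def Claim_equal_normalize_address : Prop := ∀ (value : List (String × String)) (params : Option (List (String × String))), Dom_normalize_address value params → Spec_normalize_address value params (normalize_address value params)

-- ===== LEMMAS AND PROOFS =====

-- proof-side copies of B's one-pass step, split into its two independent components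
def pvBStep (be : PySem.Dict String (Int × String) × PySem.Dict String String) (fv : String × String) :
    PySem.Dict String (Int × String) × PySem.Dict String String :=
  match pvLookupTableB.get? fv.1 with
  | some sr =>
    (match be.1.get? sr.1 with
     | none => be.1.insert sr.1 (sr.2, fv.2)
     | some p => if sr.2 < p.1 then be.1.insert sr.1 (sr.2, fv.2) else be.1, be.2)
  | none => (be.1, be.2.insert fv.1 fv.2)

def pvBestStep (b : PySem.Dict String (Int × String)) (fv : String × String) : PySem.Dict String (Int × String) :=
  match pvLookupTableB.get? fv.1 with
  | some sr =>
    match b.get? sr.1 with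
    | none => b.insert sr.1 (sr.2, fv.2)
    | some p => if sr.2 < p.1 then b.insert sr.1 (sr.2, fv.2) else b
  | none => b

def pvExtraStep (e : PySem.Dict String String) (fv : String × String) : PySem.Dict String String :=
  match pvLookupTableB.get? fv.1 with
  | some _ => e
  | none => e.insert fv.1 fv.2

lemma pvB_split (value : List (String × String)) (b : PySem.Dict String (Int × String)) (e : PySem.Dict String String) :
    value.foldl pvBStep (b, e) = (value.foldl pvBestStep b, value.foldl pvExtraStep e) := by
  induction value generalizing b e with
  | nil => rfl
  | cons x l ih =>
      simp only [List.foldl_cons]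
      rw [show pvBStep (b, e) x = (pvBestStep b x, pvExtraStep e x) from ?_, ih]
      simp only [pvBStep, pvBestStep, pvExtraStep]
      cases pvLookupTableB.get? x.1 <;> rfl

-- A's per-standard-field scan, structurally, carrying the would-be rank s
def pvAux (vars : List String) (s : Int) (value : List (String × String)) : Option (Int × String) :=
  match vars with
  | [] => none
  | g :: vs =>
      match pvLook value g with
      | some v => some (s, v)
      | none => pvAux vs (s + 1) value

-- position of f in vars, counted from s
def pvVarIdx (vars : List String) (s : Int) (f : String) : Option Int :=
  match vars with
  | [] => none
  | g :: vs => if g == f then some s else pvVarIdx vs (s + 1) f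

-- the rank B's lookup table assigns to f within the standard field std
def pvRankOf (std f : String) : Option Int :=
  match pvLookupTableB.get? f with
  | some sr => if sr.1 = std then some sr.2 else none
  | none => none

lemma pvAux_nil (vars : List String) (s : Int) : pvAux vars s [] = none := by
  induction vars generalizing s with
  | nil => rfl
  | cons g vs ih => simpa [pvAux, pvLook] using ih (s + 1)

lemma pvAux_mono (vars : List String) (s : Int) (value : List (String × String)) (r : Int) (v : String)
    (h : pvAux vars s value = some (r, v)) : s ≤ r := by
  induction vars generalizing s with
  | nil => simp [pvAux] at h
  | cons g vs ih =>
      simp only [pvAux] at h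
      cases hg : pvLook value g with
      | some w => rw [hg] at h; simp at h; omega
      | none => rw [hg] at h; have := ih (s + 1) h; omega

lemma pvVarIdx_mono (vars : List String) (s : Int) (f : String) (p : Int)
    (h : pvVarIdx vars s f = some p) : s ≤ p := by
  induction vars generalizing s with
  | nil => simp [pvVarIdx] at h
  | cons g vs ih =>
      simp only [pvVarIdx] at h
      by_cases hg : (g == f) = true
      · rw [if_pos hg] at h; injection h with h; omega
      · rw [if_neg hg] at h; have := ih (s + 1) h; omega

lemma pvLook_append (l : List (String × String)) (f v g : String) :
    pvLook (l ++ [(f, v)]) g = (pvLook l g).or (if f == g then some v else none) := by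
  simp only [pvLook, List.find?_append]
  cases hl : l.find? (fun kv => kv.1 == f) <;>
  · cases h : l.find? (fun kv => kv.1 == g)
    · simp [List.find?, Option.or]
      split <;> simp_all
    · simp [Option.or]

-- appending an entry whose key is not in vars does not change A's scan
lemma pvAux_append_none (vars : List String) (s : Int) (l : List (String × String)) (f v : String)
    (h : pvVarIdx vars s f = none) : pvAux vars s (l ++ [(f, v)]) = pvAux vars s l := by
  induction vars generalizing s with
  | nil => rfl
  | cons g vs ih =>
      simp only [pvVarIdx] at h
      by_cases hg : (g == f) = true
      · simp [hg] at h
      · have hne : (f == g) = false := by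
          cases hfg : f == g
          · exact rfl
          · exact absurd (by simp_all : g = f) (by simp_all)
        rw [if_neg (by simp [hg])] at h
        simp only [pvAux, pvLook_append, hne]
        cases hlg : pvLook l g with
        | some w => simp [Option.or]
        | none => simp only [Option.or]; simp [ih (s + 1) h]

-- appending an entry whose key sits at absolute position p in vars updates A's scan
-- exactly the way B's keep-the-lowest-rank step does
lemma pvAux_append_idx (vars : List String) (s : Int) (l : List (String × String)) (f v : String) (p : Int)
    (h : pvVarIdx vars s f = some p) :
    pvAux vars s (l ++ [(f, v)]) =
      match pvAux vars s l with
      | none => some (p, v)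
      | some (r0, v0) => if p < r0 then some (p, v) else some (r0, v0) := by
  induction vars generalizing s with
  | nil => simp [pvVarIdx] at h
  | cons g vs ih =>
      simp only [pvVarIdx] at h
      by_cases hg : (g == f) = true
      · have hgf : g = f := by simp_all
        rw [if_pos hg] at h
        injection h with h; subst h; subst hgf
        simp only [pvAux, pvLook_append, BEq.refl]
        cases hlg : pvLook l g with
        | some w => simp [Option.or]
        | none =>
            simp only [Option.or]
            cases hvs : pvAux vs (s + 1) l with
            | none => simp
            | some q =>
                obtain ⟨r1, v1⟩ := q
                have hs1 : s + 1 ≤ r1 := pvAux_mono _ _ _ _ _ hvs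
                simp [if_pos (by omega : s < r1)]
      · have hne : (f == g) = false := by
          cases hfg : f == g
          · exact rfl
          · exact absurd (by simp_all : g = f) (by simp_all)
        rw [if_neg (by simp [hg])] at h
        simp only [pvAux, pvLook_append, hne]
        cases hlg : pvLook l g with
        | some w =>
            have hp : s + 1 ≤ p := pvVarIdx_mono _ _ _ _ h
            simp [Option.or, if_neg (by omega : ¬ p < s)]
        | none =>
            simp only [Option.or]
            exact ih (s + 1) h

-- the fold of B's best-step, observed at one standard field, is A's scan of that field's variations
theorem pvKey (std : String) (vars : List String)
    (hL : ∀ f, pvRankOf std f = pvVarIdx vars 0 f) (value : List (String × String)) :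
    (value.foldl pvBestStep PySem.Dict.empty).get? std = pvAux vars 0 value := by
  induction value using List.reverseRecOn with
  | nil => simp [List.foldl_nil, PySem.Dict.get?_empty, pvAux_nil]
  | append_singleton l x ih =>
      obtain ⟨f, v⟩ := x
      rw [List.foldl_append, List.foldl_cons, List.foldl_nil]
      simp only [pvBestStep]
      cases hf : pvLookupTableB.get? f with
      | none =>
          rw [pvAux_append_none _ _ _ _ _ (by rw [← hL]; simp [pvRankOf, hf])]
          exact ih
      | some sr =>
          obtain ⟨s1, r⟩ := sr
          by_cases hstd : s1 = std
          · subst hstd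
            rw [pvAux_append_idx vars 0 l f v r (by rw [← hL]; simp [pvRankOf, hf]), ← ih]
            cases hb : (l.foldl pvBestStep PySem.Dict.empty).get? s1 with
            | none => simp [hb, PySem.Dict.get?_insert_self]
            | some p =>
                simp only [hb]
                by_cases hr : r < p.1
                · simp [hr, PySem.Dict.get?_insert_self]
                · simp [hr]
                  exact hb
          · rw [pvAux_append_none _ _ _ _ _ (by rw [← hL]; simp [pvRankOf, hf, hstd]), ← ih]
            have hne : std ≠ s1 := fun h => hstd h.symm
            cases hb : (l.foldl pvBestStep PySem.Dict.empty).get? s1 with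
            | none => simp [hb, PySem.Dict.get?_insert_of_ne _ _ hne]
            | some p =>
                simp only [hb]
                by_cases hr : r < p.1
                · simp [hr, PySem.Dict.get?_insert_of_ne _ _ hne]
                · simp [hr]

-- A's variation scan equals the rank-carrying scan, forgetting the rank
lemma pvFind_eq_aux (vars : List String) (s : Int) (value : List (String × String)) :
    ((vars.find? (fun f => (pvLook value f).isSome)).map (fun f => (pvLook value f).getD "")) =
      (pvAux vars s value).map (fun q => q.2) := by
  induction vars generalizing s with
  | nil => rfl
  | cons g vs ih =>
      simp only [pvAux, List.find?]
      cases hg : pvLook value g with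
      | some w => simp [hg]
      | none => simp only [Option.isSome_none]; simpa [hg] using ih (s + 1)

-- A's first loop builds exactly the per-field filterMap (the inserted keys are distinct and fresh)
lemma pvA_fold_items (m : List (String × List String)) (d : PySem.Dict String String)
    (value : List (String × String))
    (hfresh : ∀ p ∈ m, d.contains p.1 = false) (hnd : (m.map Prod.fst).Nodup) :
    (m.foldl (fun d p =>
        match p.2.find? (fun f => (pvLook value f).isSome) with
        | some f => d.insert p.1 ((pvLook value f).getD "")
        | none => d) d).items =
      d.items ++ m.filterMap (fun p =>
        ((p.2.find? (fun f => (pvLook value f).isSome)).map (fun f => (pvLook value f).getD "")).map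
          (fun w => (p.1, w))) := by
  induction m generalizing d with
  | nil => simp
  | cons q m ih =>
      simp only [List.foldl_cons, List.filterMap_cons]
      have hq : d.contains q.1 = false := hfresh q List.mem_cons_self
      cases hfind : q.2.find? (fun f => (pvLook value f).isSome) with
      | none =>
          simp only [Option.map_none]
          exact ih d (fun p hp => hfresh p (List.mem_cons_of_mem _ hp)) (by simpa using hnd.of_cons)
      | some f =>
          simp only [Option.map_some]
          rw [ih (d.insert q.1 ((pvLook value f).getD "")) ?_ (by simpa using hnd.of_cons)]
          · rw [PySem.Dict.items_insert_of_not_contains _ _ hq]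
            simp
          · intro p hp
            rw [PySem.Dict.contains_insert]
            have h1 : p.1 ≠ q.1 := by
              simp only [List.map_cons, List.nodup_cons] at hnd
              exact fun h => hnd.1 (h ▸ List.mem_map_of_mem hp)
            simp [h1, hfresh p (List.mem_cons_of_mem _ hp)]

-- all 18 variation strings
def pvAllVars : List String :=
  ["street", "street_address", "address_line_1", "line1", "street2", "address_line_2", "line2",
   "city", "locality", "state", "region", "province", "postal_code", "zip", "zip_code", "postcode",
   "country", "country_code"]

-- B's lookup table, evaluated
lemma pvLookupTableB_eq : pvLookupTableB = PySem.Dict.mk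
    [("street", ("street", 0)), ("street_address", ("street", 1)), ("address_line_1", ("street", 2)),
     ("line1", ("street", 3)), ("street2", ("street2", 0)), ("address_line_2", ("street2", 1)),
     ("line2", ("street2", 2)), ("city", ("city", 0)), ("locality", ("city", 1)),
     ("state", ("state", 0)), ("region", ("state", 1)), ("province", ("state", 2)),
     ("postal_code", ("postal_code", 0)), ("zip", ("postal_code", 1)), ("zip_code", ("postal_code", 2)),
     ("postcode", ("postal_code", 3)), ("country", ("country", 0)), ("country_code", ("country", 1))] := by
  decide

lemma pvLookupTableB_not_mem (f : String) (h : f ∉ pvAllVars) : pvLookupTableB.get? f = none := by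
  rw [pvLookupTableB_eq]
  simp only [PySem.Dict.get?]
  rw [List.find?_eq_none.mpr, Option.map_none]
  intro x hx hbe
  apply h
  have hfx : f = x.1 := (eq_of_beq hbe).symm
  rw [hfx]
  fin_cases hx <;> decide

lemma pvVarIdx_none_of_not_mem (vars : List String) (s : Int) (f : String) (h : f ∉ vars) :
    pvVarIdx vars s f = none := by
  induction vars generalizing s with
  | nil => rfl
  | cons g vs ih =>
      simp only [pvVarIdx]
      have hgf : ¬ (g == f) = true := by
        intro hb
        have hg : g = f := by simpa using hb
        subst hg
        exact h List.mem_cons_self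
      rw [if_neg hgf, ih (s + 1) (fun hm => h (List.mem_cons_of_mem _ hm))]

-- every variation in A's mapping is one of the 18 variation strings
lemma pvVarsSub : ∀ p ∈ pvFieldMapping, ∀ g ∈ p.2, g ∈ pvAllVars := by decide

-- B's lookup table agrees with A's mapping, field by field
lemma pvHL : ∀ p ∈ pvFieldMapping, ∀ f, pvRankOf p.1 f = pvVarIdx p.2 0 f := by
  intro p hp f
  by_cases hf : f ∈ pvAllVars
  · fin_cases hf <;> (revert p hp; decide)
  · rw [pvVarIdx_none_of_not_mem p.2 0 f ?_]
    · simp [pvRankOf, pvLookupTableB_not_mem f hf]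
    · intro hm
      exact hf (pvVarsSub p hp f hm)

-- membership in A's mapping = a hit in B's lookup table
lemma pvCond_eq (f : String) :
    pvFieldMapping.any (fun p => p.2.any (fun g => g == f)) = (pvLookupTableB.get? f).isSome := by
  by_cases hf : f ∈ pvAllVars
  · fin_cases hf <;> decide
  · rw [pvLookupTableB_not_mem f hf]
    simp only [Option.isSome_none]
    rw [List.any_eq_false]
    intro p hp
    rw [Bool.not_eq_true, List.any_eq_false]
    intro g hg hbe
    have hgf : g = f := by simpa using hbe
    exact hf (hgf ▸ pvVarsSub p hp g hg)

-- an insertion whose key is absent leaves a dict's items untouched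
lemma pvMap_fix_eq_self (d : PySem.Dict String String) (f v : String) (h : d.contains f = false) :
    d.items.map (fun p => if p.1 = f then (f, v) else p) = d.items := by
  rw [show d.items.map (fun p => if p.1 = f then (f, v) else p) = d.items.map id from
      List.map_congr_left ?_, List.map_id]
  intro a ha
  simp only [PySem.Dict.contains, List.any_eq_false] at h
  have ha1 : ¬ a.1 = f := by simpa using h a ha
  simp [ha1]

-- the extras loop appends its insertions after an untouched prefix of standard fields
lemma pvGlue (l : List (String × String)) (d e : PySem.Dict String String)
    (hd : ∀ k, d.contains k = true → (pvLookupTableB.get? k).isSome = true)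
    (he : ∀ k, e.contains k = true → (pvLookupTableB.get? k).isSome = false) :
    (l.foldl pvExtraStep (PySem.Dict.mk (d.items ++ e.items))).items =
      d.items ++ (l.foldl pvExtraStep e).items := by
  induction l generalizing e with
  | nil => rfl
  | cons x l ih =>
      obtain ⟨f, v⟩ := x
      simp only [List.foldl_cons, pvExtraStep]
      cases hf : pvLookupTableB.get? f with
      | some sr => exact ih e he
      | none =>
          have hdc : d.contains f = false := by
            cases hc : d.contains f
            · rfl
            · have := hd f hc; rw [hf] at this; simp at this
          have hda : d.items.any (fun p => p.1 == f) = false := by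
            simpa [PySem.Dict.contains] using hdc
          have hstep : (PySem.Dict.mk (d.items ++ e.items)).insert f v
              = PySem.Dict.mk (d.items ++ (e.insert f v).items) := by
            cases hec : e.contains f with
            | false =>
                have heca : e.items.any (fun p => p.1 == f) = false := by
                  simpa [PySem.Dict.contains] using hec
                simp [PySem.Dict.insert, PySem.Dict.contains, List.any_append, hda, heca,
                  List.append_assoc]
            | true =>
                have heca : e.items.any (fun p => p.1 == f) = true := by
                  simpa [PySem.Dict.contains] using hec
                simp [PySem.Dict.insert, PySem.Dict.contains, List.any_append, hda, heca,
                  List.map_append, pvMap_fix_eq_self d f v hdc]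
          rw [hstep]
          refine ih (e.insert f v) (fun k hk => ?_)
          rw [PySem.Dict.contains_insert] at hk
          by_cases hkf : k = f
          · subst hkf; rw [hf]; rfl
          · have : e.contains k = true := by simpa [hkf] using hk
            exact he k this

theorem pv_main (value : List (String × String)) (params : Option (List (String × String))) :
    normalize_address value params = normalize_address_alt value params := by
  by_cases hv : value = []
  · simp [normalize_address, normalize_address_alt, hv]
  · have hA : normalize_address value params
        = (value.foldl (fun d fv =>
            if pvFieldMapping.any (fun p => p.2.any (fun f => f == fv.1)) then d
            else d.insert fv.1 fv.2)
          (pvFieldMapping.foldl (fun d p =>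
            match p.2.find? (fun f => (pvLook value f).isSome) with
            | some f => d.insert p.1 ((pvLook value f).getD "")
            | none => d) PySem.Dict.empty)).items := by
      unfold normalize_address; rw [if_neg hv]
    have hBalt : normalize_address_alt value params
        = pvFieldMappingB.filterMap (fun p =>
            ((value.foldl pvBestStep PySem.Dict.empty).get? p.1).map (fun q => (p.1, q.2)))
          ++ (value.foldl pvExtraStep PySem.Dict.empty).items := by
      unfold normalize_address_alt; rw [if_neg hv]
      change pvFieldMappingB.filterMap (fun p =>
            ((value.foldl pvBStep (PySem.Dict.empty, PySem.Dict.empty)).1.get? p.1).map (fun q => (p.1, q.2)))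
          ++ (value.foldl pvBStep (PySem.Dict.empty, PySem.Dict.empty)).2.items = _
      rw [pvB_split]
    rw [hA, hBalt]
    have hstep : (fun (d : PySem.Dict String String) (fv : String × String) =>
        if pvFieldMapping.any (fun p => p.2.any (fun f => f == fv.1)) then d
        else d.insert fv.1 fv.2) = pvExtraStep := by
      funext d fv
      rw [pvCond_eq]
      cases hf : pvLookupTableB.get? fv.1 <;> simp [pvExtraStep, hf]
    rw [hstep]
    have hA0 := pvA_fold_items pvFieldMapping PySem.Dict.empty value
      (fun p _ => PySem.Dict.contains_empty (ν := String) p.1) (by decide)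
    have hd : ∀ k, (pvFieldMapping.foldl (fun d p =>
        match p.2.find? (fun f => (pvLook value f).isSome) with
        | some f => d.insert p.1 ((pvLook value f).getD "")
        | none => d) PySem.Dict.empty).contains k = true → (pvLookupTableB.get? k).isSome = true := by
      intro k hk
      simp only [PySem.Dict.contains] at hk
      rw [hA0] at hk
      simp only [List.any_eq_true] at hk
      obtain ⟨pr, hpr, hbeq⟩ := hk
      rw [show (PySem.Dict.empty : PySem.Dict String String).items = [] from rfl,
        List.nil_append, List.mem_filterMap] at hpr
      obtain ⟨p, hpmem, hsome⟩ := hpr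
      rw [Option.map_eq_some_iff] at hsome
      obtain ⟨w, _, hw⟩ := hsome
      have hk1 : k = p.1 := by
        have : pr.1 = k := by simpa using hbeq
        rw [← this, ← hw]
      have hall : ∀ p ∈ pvFieldMapping, (pvLookupTableB.get? p.1).isSome = true := by decide
      rw [hk1]
      exact hall p hpmem
    have he : ∀ k, (PySem.Dict.empty : PySem.Dict String String).contains k = true →
        (pvLookupTableB.get? k).isSome = false := by
      intro k hk
      rw [PySem.Dict.contains_empty] at hk
      exact absurd hk (by simp)
    have hglue := pvGlue value _ PySem.Dict.empty hd he
    have hmk : PySem.Dict.mk ((pvFieldMapping.foldl (fun d p =>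
        match p.2.find? (fun f => (pvLook value f).isSome) with
        | some f => d.insert p.1 ((pvLook value f).getD "")
        | none => d) PySem.Dict.empty).items ++ (PySem.Dict.empty : PySem.Dict String String).items)
        = pvFieldMapping.foldl (fun d p =>
            match p.2.find? (fun f => (pvLook value f).isSome) with
            | some f => d.insert p.1 ((pvLook value f).getD "")
            | none => d) PySem.Dict.empty := by
      rw [show (PySem.Dict.empty : PySem.Dict String String).items = [] from rfl, List.append_nil]
    rw [hmk] at hglue
    rw [hglue, hA0]
    rw [show (PySem.Dict.empty : PySem.Dict String String).items = [] from rfl, List.nil_append]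
    congr 1
    rw [show pvFieldMappingB = pvFieldMapping from rfl]
    apply List.filterMap_congr
    intro p hp
    rw [pvFind_eq_aux p.2 0 value, pvKey p.1 p.2 (pvHL p hp) value]
    cases pvAux p.2 0 value <;> rfl

-- ===== VERDICT (by name: the statement is the Claim_ definition above) =====
theorem normalize_address_spec : Claim_equal_normalize_address := by
  intro value params _
  exact pv_main value params
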